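-- pv_equiv track=rewrite | github.com/lixian-shu/AgentGate | python/agentgate/cli/main.py | _compute_scan_score
-- ===== SOURCE A (Python) =====
-- from typing import Any, Optional
--
-- def _compute_scan_score(
--     findings: list[dict[str, Any]], has_policy: bool
-- ) -> int:
--     """Compute a security score from 0 to 100.
--
--     Deductions:
--         CRITICAL: -25 each (max -50)
--         HIGH:     -10 each (max -30)
--         MEDIUM:    -5 each (max -20)
--         LOW:       -2 each (max -10)
--     Bonus:
--         +10 if policy file exists
--     """
--     score = 100
--
--     severity_deductions = {
--         "CRITICAL": (25, 50),
--         "HIGH": (10, 30),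
--         "MEDIUM": (5, 20),
--         "LOW": (2, 10),
--     }
--
--     for severity, (per_finding, max_deduction) in severity_deductions.items():
--         count = sum(1 for f in findings if f["severity"] == severity)
--         deduction = min(count * per_finding, max_deduction)
--         score -= deduction
--
--     # Policy file is expected -- no bonus, but missing is already a CRITICAL finding.
--     score = max(0, min(100, score))
--     return score
-- ===== SOURCE B (Python) =====
-- def _compute_scan_score(findings, has_policy):
--     # Single pass with saturating per-severity accumulators: each finding
--     # immediately adds its per-finding penalty, capped on the spot, so no
--     # counts and no deduction table walk are needed afterwards.
--     dc = dh = dm = dl = 0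
--     for f in findings:
--         sev = f["severity"]
--         if sev == "CRITICAL":
--             dc = min(dc + 25, 50)
--         elif sev == "HIGH":
--             dh = min(dh + 10, 30)
--         elif sev == "MEDIUM":
--             dm = min(dm + 5, 20)
--         elif sev == "LOW":
--             dl = min(dl + 2, 10)
--     return max(0, min(100, 100 - dc - dh - dm - dl))
-- ===== Notes on version B (the rewrite author's own statement) =====
-- stated objective: alternative
-- what changed: A rescans the findings list once per severity and applies min(count*per, cap) afterwards; B makes a single pass with four saturating accumulators that cap each deduction incrementally (d = min(d+per, cap)) as findings arrive, with no counts and no deduction-table walk.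
import Mathlib
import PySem

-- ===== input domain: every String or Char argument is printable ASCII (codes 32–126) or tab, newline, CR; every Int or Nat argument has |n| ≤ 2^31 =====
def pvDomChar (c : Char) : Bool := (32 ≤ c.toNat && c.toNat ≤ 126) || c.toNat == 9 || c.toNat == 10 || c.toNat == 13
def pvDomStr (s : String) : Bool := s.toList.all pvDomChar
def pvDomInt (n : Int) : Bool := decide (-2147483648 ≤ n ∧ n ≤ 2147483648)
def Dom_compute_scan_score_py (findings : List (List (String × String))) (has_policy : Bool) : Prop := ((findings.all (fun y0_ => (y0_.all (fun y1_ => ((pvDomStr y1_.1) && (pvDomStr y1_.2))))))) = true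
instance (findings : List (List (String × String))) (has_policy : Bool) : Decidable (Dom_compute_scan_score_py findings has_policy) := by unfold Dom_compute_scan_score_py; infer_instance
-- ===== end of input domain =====

-- B replaces A's four per-severity rescans + min(count*per, cap) by ONE pass with saturating
-- accumulators (d = min(d+per, cap) per finding); equal return values proved on findings whose
-- dicts all carry a "severity" key (A raises KeyError otherwise, and so does B).

-- ===== PORT A =====
def pvSevTable : List (String × (Int × Int)) :=
  [("CRITICAL", (25, 50)), ("HIGH", (10, 30)), ("MEDIUM", (5, 20)), ("LOW", (2, 10))]

def compute_scan_score_py (findings : List (List (String × String))) (has_policy : Bool) : Int :=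
  let score : Int :=
    pvSevTable.foldl (fun score p =>
      let count : Int := findings.foldl (fun c f =>
        if (PySem.Dict.mk f).get? "severity" == some p.1 then c + 1 else c) 0
      score - min (count * p.2.1) p.2.2) 100
  max 0 (min 100 score)

-- ===== PORT B =====
-- one finding's step on the four saturating accumulators (dc, dh, dm, dl)
def pvStepB (st : Int × Int × Int × Int) (f : List (String × String)) : Int × Int × Int × Int :=
  let sev := (PySem.Dict.mk f).getD "severity" ""   -- under Pre_, exactly Python's f["severity"]
  if sev == "CRITICAL" then (min (st.1 + 25) 50, st.2.1, st.2.2.1, st.2.2.2)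
  else if sev == "HIGH" then (st.1, min (st.2.1 + 10) 30, st.2.2.1, st.2.2.2)
  else if sev == "MEDIUM" then (st.1, st.2.1, min (st.2.2.1 + 5) 20, st.2.2.2)
  else if sev == "LOW" then (st.1, st.2.1, st.2.2.1, min (st.2.2.2 + 2) 10)
  else st

def compute_scan_score_py_alt (findings : List (List (String × String))) (has_policy : Bool) : Int :=
  let d := findings.foldl pvStepB (0, 0, 0, 0)
  max 0 (min 100 (100 - d.1 - d.2.1 - d.2.2.1 - d.2.2.2))

-- ===== PRECONDITION & SPEC =====
-- Pre_ excludes findings that lack a "severity" key, on which A (and B) raise KeyError.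
def Pre_compute_scan_score_py (findings : List (List (String × String))) (has_policy : Bool) : Prop :=
  ∀ f ∈ findings, (PySem.Dict.mk f).contains "severity" = true
instance (findings : List (List (String × String))) (has_policy : Bool) : Decidable (Pre_compute_scan_score_py findings has_policy) := by unfold Pre_compute_scan_score_py; infer_instance
def pvWitness_compute_scan_score_py : (List (List (String × String))) × Bool :=
  ([[("severity", "HIGH")], [("severity", "LOW"), ("id", "x")]], false)

def Spec_compute_scan_score_py (findings : List (List (String × String))) (has_policy : Bool) (out : Int) : Prop := out = compute_scan_score_py_alt findings has_policy
instance (findings : List (List (String × String))) (has_policy : Bool) (out : Int) : Decidable (Spec_compute_scan_score_py findings has_policy out) := by unfold Spec_compute_scan_score_py; infer_instance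

-- ===== CLAIM (what is proved, stated in full; the proofs are below) =====
def Claim_equal_compute_scan_score_py : Prop := ∀ (findings : List (List (String × String))) (has_policy : Bool), Dom_compute_scan_score_py findings has_policy → Pre_compute_scan_score_py findings has_policy → Spec_compute_scan_score_py findings has_policy (compute_scan_score_py findings has_policy)

-- ===== LEMMAS AND PROOFS =====

def pvSevOf (f : List (String × String)) : String := (PySem.Dict.mk f).getD "severity" ""

-- A's per-severity counting scan equals a count over the mapped severity list (under Pre_).
theorem pv_count_eq (findings : List (List (String × String))) (sev : String)
    (h : ∀ f ∈ findings, (PySem.Dict.mk f).contains "severity" = true) (c0 : Int) :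
    findings.foldl (fun c f =>
        if (PySem.Dict.mk f).get? "severity" == some sev then c + 1 else c) c0
    = c0 + ((findings.map pvSevOf).count sev : Int) := by
  induction findings generalizing c0 with
  | nil => simp
  | cons f fs ih =>
    have hf := h f (List.mem_cons_self)
    have hrest : ∀ g ∈ fs, (PySem.Dict.mk g).contains "severity" = true :=
      fun g hg => h g (List.mem_cons_of_mem _ hg)
    have hs : (PySem.Dict.get? (PySem.Dict.mk f) "severity").isSome = true := by
      rw [← PySem.Dict.contains_eq_isSome_get?]; exact hf
    obtain ⟨v, hv⟩ := Option.isSome_iff_exists.mp hs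
    have hgd : pvSevOf f = v := by
      unfold pvSevOf; rw [PySem.Dict.getD_eq_get?_getD, hv]; rfl
    rw [List.foldl_cons, ih hrest, List.map_cons, List.count_cons, hv, hgd]
    by_cases hvs : v = sev
    · simp [hvs]; ring
    · simp [hvs]

-- B's single saturating pass computes min(count*per, cap) in each component.
theorem pv_foldB (fs : List (List (String × String))) (a b c d : Int) :
    fs.foldl pvStepB (min (25 * a) 50, min (10 * b) 30, min (5 * c) 20, min (2 * d) 10)
    = (min (25 * (a + ((fs.map pvSevOf).count "CRITICAL" : Int))) 50,
       min (10 * (b + ((fs.map pvSevOf).count "HIGH" : Int))) 30,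
       min (5 * (c + ((fs.map pvSevOf).count "MEDIUM" : Int))) 20,
       min (2 * (d + ((fs.map pvSevOf).count "LOW" : Int))) 10) := by
  induction fs generalizing a b c d with
  | nil => simp
  | cons f fs ih =>
    rw [List.foldl_cons]
    have hstep : pvStepB (min (25 * a) 50, min (10 * b) 30, min (5 * c) 20, min (2 * d) 10) f
        = if pvSevOf f = "CRITICAL" then
            (min (25 * (a + 1)) 50, min (10 * b) 30, min (5 * c) 20, min (2 * d) 10)
          else if pvSevOf f = "HIGH" then
            (min (25 * a) 50, min (10 * (b + 1)) 30, min (5 * c) 20, min (2 * d) 10)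
          else if pvSevOf f = "MEDIUM" then
            (min (25 * a) 50, min (10 * b) 30, min (5 * (c + 1)) 20, min (2 * d) 10)
          else if pvSevOf f = "LOW" then
            (min (25 * a) 50, min (10 * b) 30, min (5 * c) 20, min (2 * (d + 1)) 10)
          else (min (25 * a) 50, min (10 * b) 30, min (5 * c) 20, min (2 * d) 10) := by
      unfold pvStepB pvSevOf
      split_ifs with h1 h2 h3 h4 <;> simp_all <;> omega
    rw [hstep]
    split_ifs with h1 h2 h3 h4 <;>
      rw [ih] <;> simp [*] <;> ring_nf

-- ===== VERDICT (by name: the statement is the Claim_ definition above) =====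
theorem compute_scan_score_py_spec : Claim_equal_compute_scan_score_py := by
  intro findings has_policy _ hpre
  unfold Spec_compute_scan_score_py compute_scan_score_py compute_scan_score_py_alt pvSevTable
  simp only [List.foldl_cons, List.foldl_nil]
  rw [pv_count_eq findings _ hpre, pv_count_eq findings _ hpre,
      pv_count_eq findings _ hpre, pv_count_eq findings _ hpre]
  have hB := pv_foldB findings 0 0 0 0
  simp only [Int.mul_zero, Int.zero_add] at hB
  norm_num at hB ⊢
  rw [hB]
  ring_nf
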